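-- pv_equiv track=rewrite | github.com/Sleiman90/Medical_ImageProcessing | solution05.py | n_pages
-- ===== SOURCE A (Python) =====
-- def n_pages(n_digits):
--     """Determines the number of pages from the number of digits used to number all
--     pages of a book. The input number might actually not match the number of digits
--     used to number the pages of a book, in which case the function returns -1.
--
--     Example
--     -------
--     >>> n_pages(31)
--     20
--     >>> n_pages(32)
--     -1
--
--     Parameters
--     ----------
--     n_digits : integer > 0
--         Total number of digits.
--
--     Returns
--     -------
--     Number of pages or -1 (if not a valid number of digits).
--     """
--     page = 0
--     n = 0
--     while n < n_digits:
--         page += 1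
--         n += len(str(page))
--     if n == n_digits:
--         return page
--     else:
--         return -1
-- ===== SOURCE B (Python) =====
-- def n_pages(n_digits):
--     """Closed-form band computation: jump over whole digit-length bands
--     at once instead of counting page by page."""
--     if n_digits < 0:
--         return -1
--     if n_digits == 0:
--         return 0
--     d = 1
--     cum = 0      # digits used by all pages with fewer than d digits
--     start = 1    # first page with d digits (= 10**(d-1))
--     while cum + 9 * start * d < n_digits:
--         cum += 9 * start * d
--         start *= 10
--         d += 1
--     rem = n_digits - cum
--     if rem % d == 0:
--         return start - 1 + rem // d
--     return -1
-- ===== Notes on version B (the rewrite author's own statement) =====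
-- stated objective: faster
-- what changed: Replaces A's page-by-page loop (one iteration per page, summing len(str(page))) by per-digit-length band arithmetic: whole bands of equal-length page numbers are skipped with a closed-form digit count and the answer is finished with one divisibility test, so the iteration count is logarithmic in n_digits instead of linear.
import Mathlib
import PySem

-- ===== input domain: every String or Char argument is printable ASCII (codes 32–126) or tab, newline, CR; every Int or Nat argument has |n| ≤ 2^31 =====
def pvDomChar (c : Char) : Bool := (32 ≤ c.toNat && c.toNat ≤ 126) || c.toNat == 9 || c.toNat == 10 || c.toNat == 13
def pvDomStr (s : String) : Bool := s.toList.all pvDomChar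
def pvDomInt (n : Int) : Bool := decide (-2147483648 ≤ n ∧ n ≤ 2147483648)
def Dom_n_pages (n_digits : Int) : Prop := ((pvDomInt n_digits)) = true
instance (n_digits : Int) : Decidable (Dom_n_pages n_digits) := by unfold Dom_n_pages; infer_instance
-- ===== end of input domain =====

-- B replaces A's page-by-page counting loop by per-digit-length band arithmetic
-- (skip whole bands of 9*10^(d-1) pages at once, finish with one divisibility test).

-- ===== PORT A =====
-- str(page) always has at least one character (needed only for the loop's termination)
theorem one_le_len_toStr (x : Int) : 1 ≤ PySem.Str.len (PySem.Int.toStr x) := by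
  rw [PySem.Str.len_eq, PySem.Int.toList_toStr]
  unfold PySem.Int.toChars
  split
  · simp
  · have := Nat.length_toDigits_pos (b := 10) (n := x.toNat)
    exact_mod_cast this

-- the 'while n < n_digits' loop of A, state (page, n)
def n_pages_loop (n_digits page n : Int) : Int × Int :=
  if n < n_digits then
    n_pages_loop n_digits (page + 1) (n + PySem.Str.len (PySem.Int.toStr (page + 1)))
  else (page, n)
termination_by (n_digits - n).toNat
decreasing_by
  have := one_le_len_toStr (page + 1)
  omega

def n_pages (n_digits : Int) : Int :=
  let r := n_pages_loop n_digits 0 0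
  if r.2 = n_digits then r.1 else -1

-- ===== PORT B =====
-- the band loop of B, state (d, cum, start); the '0 < start ∧ 0 < d' conjuncts only
-- make the recursion total on unreachable states (B always starts at d = 1, start = 1,
-- where they hold throughout and the guard is exactly B's loop condition)
def n_pages_alt_loop (n_digits d cum start : Int) : Int × Int × Int :=
  if h : cum + 9 * start * d < n_digits ∧ 0 < start ∧ 0 < d then
    n_pages_alt_loop n_digits (d + 1) (cum + 9 * start * d) (start * 10)
  else (d, cum, start)
termination_by (n_digits - cum).toNat
decreasing_by
  obtain ⟨h1, h2, h3⟩ := h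
  have : 0 < 9 * start * d := by positivity
  omega

def n_pages_alt (n_digits : Int) : Int :=
  if n_digits < 0 then -1
  else if n_digits = 0 then 0
  else
    let r := n_pages_alt_loop n_digits 1 0 1
    let rem := n_digits - r.2.1
    if PySem.Int.mod rem r.1 = 0 then r.2.2 - 1 + PySem.Int.floordiv rem r.1 else -1

-- ===== PRECONDITION & SPEC =====
def Spec_n_pages (n_digits : Int) (out : Int) : Prop := out = n_pages_alt n_digits
instance (n_digits : Int) (out : Int) : Decidable (Spec_n_pages n_digits out) := by unfold Spec_n_pages; infer_instance

-- ===== CLAIM (what is proved, stated in full; the proofs are below) =====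
def Claim_equal_n_pages : Prop := ∀ (n_digits : Int), Dom_n_pages n_digits → Spec_n_pages n_digits (n_pages n_digits)

-- ===== LEMMAS AND PROOFS =====

-- str(p) has d+1 characters when 10^d ≤ p < 10^(d+1)
theorem len_toStr_pow (d : Nat) (p : Int) (h1 : (10 : Int) ^ d ≤ p)
    (h2 : p < (10 : Int) ^ (d + 1)) :
    PySem.Str.len (PySem.Int.toStr p) = (d : Int) + 1 := by
  have hc1 : ((10 : Int)) ^ d = ((10 ^ d : Nat) : Int) := by push_cast; ring
  have hc2 : ((10 : Int)) ^ (d + 1) = ((10 ^ (d + 1) : Nat) : Int) := by push_cast; ring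
  have hpos : (0 : Int) < (10 : Int) ^ d := by positivity
  rw [PySem.Str.len_eq, PySem.Int.toList_toStr]
  unfold PySem.Int.toChars
  rw [if_neg (by omega)]
  rw [hc1] at h1
  rw [hc2] at h2
  have h1' : 10 ^ d ≤ p.toNat := by omega
  have h2' : p.toNat < 10 ^ (d + 1) := by omega
  have hle : (Nat.toDigits 10 p.toNat).length ≤ d + 1 :=
    (Nat.length_toDigits_le_iff (by norm_num) (Nat.succ_pos d)).2 h2'
  have hgt : ¬ (Nat.toDigits 10 p.toNat).length ≤ d := by
    cases d with
    | zero =>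
      have := Nat.length_toDigits_pos (b := 10) (n := p.toNat)
      omega
    | succ k =>
      rw [Nat.length_toDigits_le_iff (by norm_num) (Nat.succ_pos k)]
      omega
  omega

-- A's loop, run entirely inside the band of (d+1)-digit pages and finishing there
theorem within_band (d : Nat) (n_digits : Int) : ∀ (fuel : Nat) (page n : Int),
    fuel = (n_digits - n).toNat →
    (10 : Int) ^ d ≤ page + 1 →
    n ≤ n_digits →
    n_digits ≤ n + ((d : Int) + 1) * ((10 : Int) ^ (d + 1) - 1 - page) →
    (if (n_pages_loop n_digits page n).2 = n_digits then (n_pages_loop n_digits page n).1 else -1)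
      = if ((d : Int) + 1) ∣ (n_digits - n) then page + (n_digits - n) / ((d : Int) + 1) else -1 := by
  intro fuel
  induction fuel using Nat.strong_induction_on with
  | _ fuel ih =>
    intro page n hfuel hlo hle hbound
    by_cases hlt : n < n_digits
    · -- page < 10^(d+1) - 1, next page is in the band
      have hrest : 0 < (10 : Int) ^ (d + 1) - 1 - page := by
        by_contra hR
        have hR : (10 : Int) ^ (d + 1) - 1 - page ≤ 0 := by omega
        have := mul_nonpos_of_nonneg_of_nonpos
          (show (0 : Int) ≤ (d : Int) + 1 by positivity) hR
        omega
      have hlen : PySem.Str.len (PySem.Int.toStr (page + 1)) = (d : Int) + 1 :=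
        len_toStr_pow d (page + 1) hlo (by omega)
      rw [n_pages_loop, if_pos hlt, hlen]
      by_cases hover : n_digits < n + ((d : Int) + 1)
      · -- overshoot: loop stops with n' ≠ n_digits; divisibility fails
        rw [n_pages_loop]
        rw [if_neg (show ¬ (n + ((d : Int) + 1) < n_digits) from by omega)]
        have hnd : ¬ ((d : Int) + 1) ∣ (n_digits - n) := by
          intro hdvd
          have := Int.le_of_dvd (by omega) hdvd
          omega
        have hpair : ((page + 1, n + ((d : Int) + 1)) : Int × Int).2 = n + ((d : Int) + 1) := rfl
        rw [hpair]
        rw [if_neg (show ¬ (n + ((d : Int) + 1) = n_digits) from by omega), if_neg hnd]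
      · -- step and recurse
        have hbound' : n_digits ≤ n + ((d : Int) + 1)
            + ((d : Int) + 1) * ((10 : Int) ^ (d + 1) - 1 - (page + 1)) := by
          have he : n + ((d : Int) + 1) + ((d : Int) + 1) * ((10 : Int) ^ (d + 1) - 1 - (page + 1))
              = n + ((d : Int) + 1) * ((10 : Int) ^ (d + 1) - 1 - page) := by ring
          omega
        have hstep := ih (n_digits - (n + ((d : Int) + 1))).toNat (by omega)
          (page + 1) (n + ((d : Int) + 1)) rfl (by omega) (by omega) hbound'
        rw [hstep]
        have hiff : (((d : Int) + 1) ∣ (n_digits - n))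
            ↔ (((d : Int) + 1) ∣ (n_digits - (n + ((d : Int) + 1)))) := by
          constructor
          · intro h
            have hs := dvd_sub h (dvd_refl ((d : Int) + 1))
            have he : n_digits - n - ((d : Int) + 1) = n_digits - (n + ((d : Int) + 1)) := by ring
            rwa [he] at hs
          · intro h
            have hs := dvd_add h (dvd_refl ((d : Int) + 1))
            have he : n_digits - (n + ((d : Int) + 1)) + ((d : Int) + 1) = n_digits - n := by ring
            rwa [he] at hs
        by_cases hdvd : ((d : Int) + 1) ∣ (n_digits - (n + ((d : Int) + 1)))
        · rw [if_pos hdvd, if_pos (hiff.mpr hdvd)]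
          have hsplit : n_digits - n = n_digits - (n + ((d : Int) + 1)) + 1 * ((d : Int) + 1) := by
            ring
          rw [hsplit, Int.add_mul_ediv_right _ _ (by omega : ((d : Int) + 1) ≠ 0)]
          ring
        · rw [if_neg hdvd, if_neg (fun h => hdvd (hiff.mp h))]
    · -- loop already stopped: n = n_digits
      have : n = n_digits := by omega
      rw [n_pages_loop, if_neg hlt]
      subst this
      simp

-- A's loop, skipping a full band: from (10^(d+1)-1 ... ) end state
theorem skip_band (d : Nat) (n_digits : Int) : ∀ (fuel : Nat) (page n : Int),
    fuel = ((10 : Int) ^ (d + 1) - 1 - page).toNat →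
    (10 : Int) ^ d ≤ page + 1 →
    page ≤ (10 : Int) ^ (d + 1) - 1 →
    n + ((d : Int) + 1) * ((10 : Int) ^ (d + 1) - 1 - page) < n_digits →
    n_pages_loop n_digits page n
      = n_pages_loop n_digits ((10 : Int) ^ (d + 1) - 1)
          (n + ((d : Int) + 1) * ((10 : Int) ^ (d + 1) - 1 - page)) := by
  intro fuel
  induction fuel with
  | zero =>
    intro page n hfuel hlo hhi hlt
    have : page = (10 : Int) ^ (d + 1) - 1 := by omega
    subst this
    norm_num
  | succ k ih =>
    intro page n hfuel hlo hhi hlt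
    by_cases hend : page = (10 : Int) ^ (d + 1) - 1
    · subst hend; norm_num
    · have hrest : 0 < (10 : Int) ^ (d + 1) - 1 - page := by omega
      have hn : n < n_digits := by
        have := mul_nonneg (show (0 : Int) ≤ (d : Int) + 1 by positivity) (le_of_lt hrest)
        omega
      have hlen : PySem.Str.len (PySem.Int.toStr (page + 1)) = (d : Int) + 1 :=
        len_toStr_pow d (page + 1) hlo (by omega)
      rw [n_pages_loop, if_pos hn, hlen]
      have heq : n + ((d : Int) + 1) + ((d : Int) + 1) * ((10 : Int) ^ (d + 1) - 1 - (page + 1))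
          = n + ((d : Int) + 1) * ((10 : Int) ^ (d + 1) - 1 - page) := by ring
      have hstep := ih (page + 1) (n + ((d : Int) + 1)) (by omega) (by omega) (by omega)
        (by omega)
      rw [heq] at hstep
      exact hstep

-- B's finishing computation after the band loop
def bFinish (n_digits : Int) (r : Int × Int × Int) : Int :=
  if PySem.Int.mod (n_digits - r.2.1) r.1 = 0
  then r.2.2 - 1 + PySem.Int.floordiv (n_digits - r.2.1) r.1 else -1

-- the bridge: A's loop started at the end of band d equals B's band loop + finish
theorem bridge (n_digits : Int) : ∀ (fuel : Nat) (d : Nat) (cum : Int),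
    fuel = (n_digits - cum).toNat →
    cum < n_digits →
    (if (n_pages_loop n_digits ((10 : Int) ^ d - 1) cum).2 = n_digits
      then (n_pages_loop n_digits ((10 : Int) ^ d - 1) cum).1 else -1)
      = bFinish n_digits (n_pages_alt_loop n_digits ((d : Int) + 1) cum ((10 : Int) ^ d)) := by
  intro fuel
  induction fuel using Nat.strong_induction_on with
  | _ fuel ih =>
    intro d cum hfuel hcum
    have hpow : (0 : Int) < (10 : Int) ^ d := by positivity
    rw [n_pages_alt_loop]
    by_cases hgo : cum + 9 * (10 : Int) ^ d * ((d : Int) + 1) < n_digits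
    · rw [dif_pos ⟨hgo, hpow, by omega⟩]
      have hskip := skip_band d n_digits ((10 : Int) ^ (d + 1) - 1 - ((10 : Int) ^ d - 1)).toNat
        ((10 : Int) ^ d - 1) cum rfl (by omega)
        (by have : (10 : Int) ^ d ≤ (10 : Int) ^ (d + 1) := by
              exact pow_le_pow_right₀ (by norm_num) (by omega)
            omega)
        (by have he : (10 : Int) ^ (d + 1) - 1 - ((10 : Int) ^ d - 1) = 9 * (10 : Int) ^ d := by
              rw [pow_succ]; ring
            rw [he]; nlinarith [hgo])
      have he : (10 : Int) ^ (d + 1) - 1 - ((10 : Int) ^ d - 1) = 9 * (10 : Int) ^ d := by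
        rw [pow_succ]; ring
      rw [he] at hskip
      have hcum' : cum + ((d : Int) + 1) * (9 * (10 : Int) ^ d) = cum + 9 * (10 : Int) ^ d * ((d : Int) + 1) := by ring
      rw [hcum'] at hskip
      rw [hskip]
      have hlt' : cum + 9 * (10 : Int) ^ d * ((d : Int) + 1) < n_digits := hgo
      have := ih (n_digits - (cum + 9 * (10 : Int) ^ d * ((d : Int) + 1))).toNat
        (by have : 0 < 9 * (10 : Int) ^ d * ((d : Int) + 1) := by positivity
            omega)
        (d + 1) (cum + 9 * (10 : Int) ^ d * ((d : Int) + 1)) rfl hlt'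
      rw [pow_succ] at this ⊢
      push_cast at this ⊢
      convert this using 3
    · rw [dif_neg (fun hc => hgo hc.1)]
      have hwb := within_band d n_digits (n_digits - cum).toNat ((10 : Int) ^ d - 1) cum
        (by omega) (by omega) (by omega)
        (by have he : (10 : Int) ^ (d + 1) - 1 - ((10 : Int) ^ d - 1) = 9 * (10 : Int) ^ d := by
              rw [pow_succ]; ring
            rw [he]; nlinarith [hgo])
      rw [hwb]
      unfold bFinish
      simp only
      simp only [PySem.Int.mod_eq_zero_iff_dvd,
        PySem.Int.floordiv_eq_ediv_of_pos (show (0 : Int) < (d : Int) + 1 by omega)]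

-- ===== VERDICT (by name: the statement is the Claim_ definition above) =====
theorem n_pages_spec : Claim_equal_n_pages := by
  intro n_digits _
  unfold Spec_n_pages
  show n_pages n_digits = n_pages_alt n_digits
  simp only [n_pages, n_pages_alt]
  by_cases hneg : n_digits < 0
  · rw [if_pos hneg, n_pages_loop,
      if_neg (show ¬ ((0 : Int) < n_digits) from by omega)]
    have hp : (((0, 0) : Int × Int)).2 = (0 : Int) := rfl
    rw [hp, if_neg (show ¬ ((0 : Int) = n_digits) from by omega)]
  · rw [if_neg hneg]
    by_cases hz : n_digits = 0
    · subst hz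
      rw [n_pages_loop]
      norm_num
    · rw [if_neg hz]
      have hpos : 0 < n_digits := by omega
      have hb := bridge n_digits (n_digits - 0).toNat 0 0 rfl hpos
      norm_num [bFinish] at hb
      exact hb
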